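-- pv_equiv track=rewrite | github.com/GitaliN/Computational-Biology-Exrecises | ex3/ex3.py | weighted_matrix_func
-- ===== SOURCE A (Python) =====
-- def weighted_matrix_func(inputLst):
--     row_len = len(inputLst)
--     col_len = len(inputLst[0])
--     new_mat = []
--     for i in range(col_len):
--         row = []
--         for j in range(col_len):
--             row.append(0)
--         new_mat.append(row)
--     cols = []
--     for x in range(col_len):
--         col = []
--         for y in range(row_len):
--             col.append(inputLst[y][x])
--         cols.append(col)
--
--     for i in range(col_len):
--         for j in range(col_len):
--             counter = 0
--             for x in range(row_len):
--                 if cols[i][x] == cols[j][x]: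
--                     counter += 1
--                 else:
--                     counter -= 1
--             new_mat[i][j] = counter
--     return new_mat
-- ===== SOURCE B (Python) =====
-- def weighted_matrix_func(inputLst):
--     row_len = len(inputLst)
--     col_len = len(inputLst[0])
--     matches = [[0] * col_len for _ in range(col_len)]
--     for row in inputLst:
--         matches = [[matches[i][j] + (1 if row[i] == row[j] else 0)
--                     for j in range(col_len)]
--                    for i in range(col_len)]
--     return [[2 * m - row_len for m in row_m] for row_m in matches]
-- ===== Notes on version B (the rewrite author's own statement) =====
-- stated objective: alternative
-- what changed: B drops A's column-transpose matrix and per-pair rescan: it streams the rows once, maintaining a C×C matches matrix rebuilt per row, and derives each entry by the closed form 2*matches - row_len instead of A's +1/-1 counter per pair.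
import Mathlib
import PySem

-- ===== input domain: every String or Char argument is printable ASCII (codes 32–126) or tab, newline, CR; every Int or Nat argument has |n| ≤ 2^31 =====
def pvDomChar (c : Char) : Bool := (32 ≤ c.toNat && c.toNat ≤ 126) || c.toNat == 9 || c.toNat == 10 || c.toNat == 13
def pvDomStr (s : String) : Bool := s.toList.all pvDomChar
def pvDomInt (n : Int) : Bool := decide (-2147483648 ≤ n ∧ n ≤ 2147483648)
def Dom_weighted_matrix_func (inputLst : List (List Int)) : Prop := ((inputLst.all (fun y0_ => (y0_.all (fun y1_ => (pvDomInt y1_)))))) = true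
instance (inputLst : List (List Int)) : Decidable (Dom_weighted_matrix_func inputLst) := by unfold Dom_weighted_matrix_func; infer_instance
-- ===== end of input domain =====

-- B replaces A's column-transpose-then-pairwise-rescan with a single streaming pass over the
-- rows maintaining a C×C matches matrix, finishing with the closed form 2*matches - row_len
-- (alternative decomposition, same asymptotic cost).


-- ===== PORT A =====
def weighted_matrix_func (inputLst : List (List Int)) : List (List Int) :=
  let row_len : Int := PySem.List.len inputLst
  let col_len : Int := PySem.List.len (PySem.List.pyGetD inputLst 0 [])
  let new_mat : List (List Int) :=
    (PySem.List.pyRange 0 col_len).foldl (fun nm _i =>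
      nm ++ [(PySem.List.pyRange 0 col_len).foldl (fun r _j => r ++ [(0 : Int)]) []]) []
  let cols : List (List Int) :=
    (PySem.List.pyRange 0 col_len).foldl (fun cs x =>
      cs ++ [(PySem.List.pyRange 0 row_len).foldl (fun c y =>
        c ++ [PySem.List.pyGetD (PySem.List.pyGetD inputLst y []) x 0]) []]) []
  (PySem.List.pyRange 0 col_len).foldl (fun nm i =>
    (PySem.List.pyRange 0 col_len).foldl (fun nm j =>
      let counter : Int :=
        (PySem.List.pyRange 0 row_len).foldl (fun counter x =>
          if PySem.List.pyGetD (PySem.List.pyGetD cols i []) x 0 =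
             PySem.List.pyGetD (PySem.List.pyGetD cols j []) x 0
          then counter + 1 else counter - 1) 0
      PySem.List.pySetD nm i (PySem.List.pySetD (PySem.List.pyGetD nm i []) j counter)) nm) new_mat

-- ===== PORT B =====
def weighted_matrix_func_alt (inputLst : List (List Int)) : List (List Int) :=
  let row_len : Int := PySem.List.len inputLst
  let col_len : Int := PySem.List.len (PySem.List.pyGetD inputLst 0 [])
  let init : List (List Int) :=
    (PySem.List.pyRange 0 col_len).map (fun _ => PySem.List.pyRepeat [(0 : Int)] col_len)
  let mtchs : List (List Int) :=
    inputLst.foldl (fun m row =>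
      (PySem.List.pyRange 0 col_len).map (fun i =>
        (PySem.List.pyRange 0 col_len).map (fun j =>
          PySem.List.pyGetD (PySem.List.pyGetD m i []) j 0 +
          (if PySem.List.pyGetD row i 0 = PySem.List.pyGetD row j 0 then 1 else 0)))) init
  mtchs.map (fun row_m => row_m.map (fun m => 2 * m - row_len))

-- ===== PRECONDITION & SPEC =====
-- Pre_ excludes exactly the inputs on which the Python A raises IndexError: the empty list
-- (inputLst[0]) and ragged inputs where some row is shorter than the first row.
def Pre_weighted_matrix_func (inputLst : List (List Int)) : Prop :=
  inputLst ≠ [] ∧ ∀ r ∈ inputLst, (inputLst.headI).length ≤ r.length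
instance (inputLst : List (List Int)) : Decidable (Pre_weighted_matrix_func inputLst) := by
  unfold Pre_weighted_matrix_func; infer_instance
def pvWitness_weighted_matrix_func : List (List Int) := [[1, 2], [1, 3], [2, 2]]

def Spec_weighted_matrix_func (inputLst : List (List Int)) (out : List (List Int)) : Prop := out = weighted_matrix_func_alt inputLst
instance (inputLst : List (List Int)) (out : List (List Int)) : Decidable (Spec_weighted_matrix_func inputLst out) := by unfold Spec_weighted_matrix_func; infer_instance

-- ===== CLAIM (what is proved, stated in full; the proofs are below) =====
def Claim_equal_weighted_matrix_func : Prop := ∀ (inputLst : List (List Int)), Dom_weighted_matrix_func inputLst → Pre_weighted_matrix_func inputLst → Spec_weighted_matrix_func inputLst (weighted_matrix_func inputLst)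

-- ===== LEMMAS AND PROOFS =====

-- shared read of cell (x, i) and the 0/1 agreement count of columns i, j over the rows
def pvQ (L : List (List Int)) (x i : Int) : Int :=
  PySem.List.pyGetD (PySem.List.pyGetD L x []) i 0

def pvCnt01 (L : List (List Int)) (i j : Int) : Int :=
  (L.map (fun row => if PySem.List.pyGetD row i 0 = PySem.List.pyGetD row j 0
                     then (1 : Int) else 0)).sum

lemma take_set_succ {α : Type} (l : List α) (a : Nat) (v : α) (h : a < l.length) :
    (l.set a v).take (a + 1) = l.take a ++ [v] := by
  induction l generalizing a with
  | nil => simp at h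
  | cons x xs ih =>
    cases a with
    | zero => simp
    | succ a => simpa using ih a (by simpa using h)

-- writing f j into slot j for every j in [a, c) rewrites the tail of a length-c list to map f
lemma foldl_pySetD_seg {α : Type} (f : Int → α) (c : Nat) :
    ∀ (k a : Nat) (r : List α), c - a = k → r.length = c → a ≤ c →
      (PySem.List.pyRange (a : Int) (c : Int)).foldl
          (fun r j => PySem.List.pySetD r j (f j)) r
        = r.take a ++ (PySem.List.pyRange (a : Int) (c : Int)).map f := by
  intro k
  induction k with
  | zero =>
    intro a r hk hl hle
    have hac : a = c := by omega
    subst hac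
    simp [hl ▸ List.take_length (l := r)]
  | succ k ih =>
    intro a r hk hl hle
    have hlt : a < c := by omega
    rw [PySem.List.pyRange_one_cons (by exact_mod_cast hlt)]
    simp only [List.foldl_cons, List.map_cons, PySem.List.pySetD_natCast]
    have hcast : ((a : Int) + 1) = ((a + 1 : Nat) : Int) := by push_cast; ring
    rw [hcast, ih (a + 1) (r.set a (f a)) (by omega) (by simpa using hl) (by omega)]
    rw [take_set_succ _ _ _ (by omega)]
    simp

-- every update of the inner j-loop targets row i, so the loop factors through that row
lemma inner_factor (g : Int → Int) (i : Int) (hi0 : 0 ≤ i) :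
    ∀ (js : List Int) (nm : List (List Int)), i < (nm.length : Int) →
      js.foldl (fun nm j => PySem.List.pySetD nm i
          (PySem.List.pySetD (PySem.List.pyGetD nm i []) j (g j))) nm
        = PySem.List.pySetD nm i
            (js.foldl (fun r j => PySem.List.pySetD r j (g j))
              (PySem.List.pyGetD nm i [])) := by
  intro js
  induction js with
  | nil =>
    intro nm hlen
    simp only [List.foldl_nil]
    rw [PySem.List.pyGetD_eq_getElem nm [] hi0 hlen, PySem.List.pySetD_of_nonneg nm _ hi0]
    exact (List.set_getElem_self (by omega)).symm
  | cons j js ih =>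
    intro nm hlen
    simp only [List.foldl_cons]
    rw [ih _ (by rw [PySem.List.length_pySetD]; exact hlen)]
    have hi : i.toNat < nm.length := by omega
    have hget : ∀ v : List Int,
        PySem.List.pyGetD (PySem.List.pySetD nm i v) i [] = v := by
      intro v
      rw [PySem.List.pySetD_of_nonneg nm v hi0,
        PySem.List.pyGetD_eq_getElem _ [] hi0 (by simp; omega)]
      exact List.getElem_set_self _
    have hset : ∀ v w : List Int,
        PySem.List.pySetD (PySem.List.pySetD nm i v) i w = PySem.List.pySetD nm i w := by
      intro v w
      rw [PySem.List.pySetD_of_nonneg nm v hi0, PySem.List.pySetD_of_nonneg _ w hi0,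
        PySem.List.pySetD_of_nonneg nm w hi0]
      exact List.set_set ..
    rw [hget, hset]

-- A's assignment double loop turns the zero matrix into the map-of-maps of g
lemma outer_fold (g : Int → Int → Int) (c : Nat) :
    ∀ (k a : Nat) (nm : List (List Int)), c - a = k → nm.length = c →
      (∀ r ∈ nm, r.length = c) → a ≤ c →
      (PySem.List.pyRange (a : Int) (c : Int)).foldl
          (fun nm i => (PySem.List.pyRange 0 (c : Int)).foldl
            (fun nm j => PySem.List.pySetD nm i
              (PySem.List.pySetD (PySem.List.pyGetD nm i []) j (g i j))) nm) nm
        = nm.take a ++ (PySem.List.pyRange (a : Int) (c : Int)).map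
            (fun i => (PySem.List.pyRange 0 (c : Int)).map (g i)) := by
  intro k
  induction k with
  | zero =>
    intro a nm hk hl hrows hle
    have hac : a = c := by omega
    subst hac
    simp [hl ▸ List.take_length (l := nm)]
  | succ k ih =>
    intro a nm hk hl hrows hle
    have hlt : a < c := by omega
    rw [PySem.List.pyRange_one_cons (a := (a : Int)) (b := (c : Int)) (by exact_mod_cast hlt)]
    simp only [List.foldl_cons, List.map_cons]
    rw [inner_factor (g (a : Int)) (a : Int) (by positivity) _ nm (by exact_mod_cast hl ▸ hlt)]
    have hrow : PySem.List.pyGetD nm (a : Int) [] = nm[a]'(by omega) := by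
      rw [PySem.List.pyGetD_natCast, List.getD_eq_getElem _ _ (by omega)]
    have hrowlen : (PySem.List.pyGetD nm (a : Int) []).length = c := by
      rw [hrow]; exact hrows _ (List.getElem_mem _)
    have hseg := foldl_pySetD_seg (g (a : Int)) c c 0 (PySem.List.pyGetD nm (a : Int) [])
      (by omega) hrowlen (by omega)
    simp only [Nat.cast_zero, List.take_zero, List.nil_append] at hseg
    rw [hseg, PySem.List.pySetD_natCast]
    have hcast : ((a : Int) + 1) = ((a + 1 : Nat) : Int) := by push_cast; ring
    set v := (PySem.List.pyRange 0 (c : Int)).map (g (a : Int)) with hv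
    have hvlen : v.length = c := by
      simp [hv, PySem.List.length_pyRange_one]
    rw [hcast, ih (a + 1) (nm.set a v) (by omega) (by simpa using hl)
      (by
        intro r hr
        rcases List.mem_or_eq_of_mem_set hr with h | h
        · exact hrows _ h
        · rw [h]; exact hvlen) (by omega)]
    rw [take_set_succ _ _ _ (by omega)]
    simp

-- B's streaming fold keeps the matrix in map-of-maps form and accumulates pvCnt01
lemma b_fold (c : Nat) :
    ∀ (rows : List (List Int)) (base : Int → Int → Int),
      rows.foldl (fun m row =>
          (PySem.List.pyRange 0 (c : Int)).map (fun i =>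
            (PySem.List.pyRange 0 (c : Int)).map (fun j =>
              PySem.List.pyGetD (PySem.List.pyGetD m i []) j 0 +
              (if PySem.List.pyGetD row i 0 = PySem.List.pyGetD row j 0 then 1 else 0))))
        ((PySem.List.pyRange 0 (c : Int)).map
          (fun i => (PySem.List.pyRange 0 (c : Int)).map (base i)))
      = (PySem.List.pyRange 0 (c : Int)).map
          (fun i => (PySem.List.pyRange 0 (c : Int)).map
            (fun j => base i j + pvCnt01 rows i j)) := by
  intro rows
  induction rows with
  | nil =>
    intro base
    simp [pvCnt01]
  | cons row rest ih =>
    intro base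
    simp only [List.foldl_cons]
    have hstep :
        (PySem.List.pyRange 0 (c : Int)).map (fun i =>
          (PySem.List.pyRange 0 (c : Int)).map (fun j =>
            PySem.List.pyGetD (PySem.List.pyGetD
              ((PySem.List.pyRange 0 (c : Int)).map
                (fun i => (PySem.List.pyRange 0 (c : Int)).map (base i))) i []) j 0 +
            (if PySem.List.pyGetD row i 0 = PySem.List.pyGetD row j 0 then 1 else 0)))
        = (PySem.List.pyRange 0 (c : Int)).map (fun i =>
            (PySem.List.pyRange 0 (c : Int)).map (fun j =>
              base i j +
              (if PySem.List.pyGetD row i 0 = PySem.List.pyGetD row j 0 then 1 else 0))) := by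
      refine List.map_congr_left ?_
      intro i hi
      obtain ⟨hi0, hic⟩ := PySem.List.mem_pyRange_one.mp hi
      refine List.map_congr_left ?_
      intro j hj
      obtain ⟨hj0, hjc⟩ := PySem.List.mem_pyRange_one.mp hj
      rw [PySem.List.pyGetD_map_pyRange_of_nonneg _ _ _ _ hi0 hic,
        PySem.List.pyGetD_map_pyRange_of_nonneg _ _ _ _ hj0 hjc]
    rw [hstep, ih (fun i j => base i j +
      (if PySem.List.pyGetD row i 0 = PySem.List.pyGetD row j 0 then 1 else 0))]
    refine List.map_congr_left ?_
    intro i _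
    refine List.map_congr_left ?_
    intro j _
    simp [pvCnt01, add_assoc]

-- the ±1 counter is the closed form 2 * (0/1 count) - length
lemma sum_pm {α : Type} (p : α → Prop) [DecidablePred p] (l : List α) :
    (l.map (fun r => if p r then (1 : Int) else -1)).sum
      = 2 * (l.map (fun r => if p r then (1 : Int) else 0)).sum - l.length := by
  induction l with
  | nil => simp
  | cons x xs ih =>
    by_cases h : p x
    · simp only [List.map_cons, List.sum_cons, if_pos h, ih, List.length_cons]
      push_cast; ring
    · simp only [List.map_cons, List.sum_cons, if_neg h, ih, List.length_cons]
      push_cast; ring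

-- total agreement of the two ports (Pre_ is only needed for the Python sides, where
-- out-of-range reads raise instead of defaulting)
theorem pv_ab_eq (L : List (List Int)) :
    weighted_matrix_func L = weighted_matrix_func_alt L := by
  simp only [weighted_matrix_func, weighted_matrix_func_alt]
  simp only [PySem.List.foldl_append_singleton_eq_map, List.nil_append,
    PySem.List.pyRepeat_singleton]
  set c : Nat := (PySem.List.pyGetD L 0 []).length with hc
  have hlen : PySem.List.len (PySem.List.pyGetD L 0 []) = (c : Int) := by
    simp [PySem.List.len, hc]
  have hlenL : PySem.List.len L = (L.length : Int) := by simp [PySem.List.len]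
  rw [hlen, hlenL]
  -- B side: init in map form, then the streaming fold
  have hinit : List.replicate ((c : Int)).toNat (0 : Int)
      = (PySem.List.pyRange 0 (c : Int)).map (fun _ => (0 : Int)) := by
    simp [List.map_const', PySem.List.length_pyRange_one]
  rw [hinit, b_fold c L (fun _ _ => 0)]
  -- A side: zero matrix invariants, then the assignment double loop
  have hzlen : ((PySem.List.pyRange 0 (c : Int)).map
      (fun _ => (PySem.List.pyRange 0 (c : Int)).map (fun _ => (0 : Int)))).length = c := by
    simp [PySem.List.length_pyRange_one]
  have houter := outer_fold
    (fun i j => (PySem.List.pyRange 0 (L.length : Int)).foldl (fun counter x =>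
      if PySem.List.pyGetD (PySem.List.pyGetD ((PySem.List.pyRange 0 (c : Int)).map
            (fun x => (PySem.List.pyRange 0 (L.length : Int)).map
              (fun y => PySem.List.pyGetD (PySem.List.pyGetD L y []) x 0))) i []) x 0 =
         PySem.List.pyGetD (PySem.List.pyGetD ((PySem.List.pyRange 0 (c : Int)).map
            (fun x => (PySem.List.pyRange 0 (L.length : Int)).map
              (fun y => PySem.List.pyGetD (PySem.List.pyGetD L y []) x 0))) j []) x 0
      then counter + 1 else counter - 1) 0)
    c c 0
    ((PySem.List.pyRange 0 (c : Int)).map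
      (fun _ => (PySem.List.pyRange 0 (c : Int)).map (fun _ => (0 : Int))))
    (by omega) hzlen
    (by intro r hr
        obtain ⟨_, _, h⟩ := List.mem_map.mp hr
        rw [← h]; simp [PySem.List.length_pyRange_one])
    (by omega)
  simp only [Nat.cast_zero, List.take_zero, List.nil_append] at houter
  rw [houter]
  -- pointwise comparison of entries
  rw [List.map_map]
  refine List.map_congr_left ?_
  intro i hi
  obtain ⟨hi0, hic⟩ := PySem.List.mem_pyRange_one.mp hi
  simp only [Function.comp_apply]
  rw [List.map_map]
  refine List.map_congr_left ?_
  intro j hj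
  simp only [Function.comp_apply]
  obtain ⟨hj0, hjc⟩ := PySem.List.mem_pyRange_one.mp hj
  rw [PySem.List.pyGetD_map_pyRange_of_nonneg _ _ _ _ hi0 hic,
    PySem.List.pyGetD_map_pyRange_of_nonneg _ _ _ _ hj0 hjc]
  have hcond : (PySem.List.pyRange 0 (L.length : Int)).foldl (fun (counter : Int) x =>
        if PySem.List.pyGetD ((PySem.List.pyRange 0 (L.length : Int)).map
              (fun y => PySem.List.pyGetD (PySem.List.pyGetD L y []) i 0)) x 0 =
           PySem.List.pyGetD ((PySem.List.pyRange 0 (L.length : Int)).map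
              (fun y => PySem.List.pyGetD (PySem.List.pyGetD L y []) j 0)) x 0
        then counter + 1 else counter - 1) 0
      = (PySem.List.pyRange 0 (L.length : Int)).foldl (fun (counter : Int) x =>
          if PySem.List.pyGetD (PySem.List.pyGetD L x []) i 0 =
             PySem.List.pyGetD (PySem.List.pyGetD L x []) j 0
          then counter + 1 else counter - 1) 0 := by
    refine PySem.List.foldl_congr_mem _ _ _ _ ?_
    intro acc x hx
    obtain ⟨hx0, hxn⟩ := PySem.List.mem_pyRange_one.mp hx
    rw [PySem.List.pyGetD_map_pyRange_of_nonneg _ _ _ _ hx0 hxn,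
      PySem.List.pyGetD_map_pyRange_of_nonneg _ _ _ _ hx0 hxn]
  refine hcond.trans ?_
  have hlenL' : (L.length : Int) = PySem.List.len L := by simp [PySem.List.len]
  rw [hlenL', PySem.List.foldl_pyRange_pyGetD L [] (fun counter row =>
      if PySem.List.pyGetD row i 0 = PySem.List.pyGetD row j 0
      then counter + 1 else counter - 1) 0 le_rfl]
  simp only [Int.toNat_zero, List.drop_zero]
  rw [PySem.List.foldl_congr_mem L _ (fun acc row => acc +
      (if PySem.List.pyGetD row i 0 = PySem.List.pyGetD row j 0 then (1 : Int) else -1)) 0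
    (by
      intro acc row _
      by_cases h : PySem.List.pyGetD row i 0 = PySem.List.pyGetD row j 0
      · simp only [if_pos h]
      · simp only [if_neg h]; ring)]
  rw [PySem.List.foldl_add]
  rw [sum_pm (fun row => PySem.List.pyGetD row i 0 = PySem.List.pyGetD row j 0) L]
  simp [pvCnt01]

-- ===== VERDICT (by name: the statement is the Claim_ definition above) =====
theorem weighted_matrix_func_spec : Claim_equal_weighted_matrix_func := by
  intro inputLst _ _
  exact pv_ab_eq inputLst
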